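-- pv_equiv track=rewrite | github.com/edwinyyyu/MemMachine | evaluation/attribute_memory/research/round22_refinements/architectures/aen3b_fair.py | render_window
-- ===== SOURCE A (Python) =====
-- def render_window(window_turns, target_turn_lo):
--     lines = []
--     in_target = False
--     for tidx, text in window_turns:
--         if not in_target and tidx >= target_turn_lo:
--             lines.append("--- TARGET TURNS (emit entries for these) ---")
--             in_target = True
--         prefix = "  TARGET" if in_target else "  CONTEXT"
--         lines.append(f"{prefix} TURN {tidx}: {text}")
--     if not in_target:
--         lines.insert(0, "--- TARGET TURNS ---")
--     return "\n".join(lines)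
-- ===== SOURCE B (Python) =====
-- def render_window(window_turns, target_turn_lo):
--     turns = list(window_turns)
--     split = next((i for i, (tidx, _) in enumerate(turns) if tidx >= target_turn_lo), None)
--     if split is None:
--         lines = ["--- TARGET TURNS ---"]
--         lines += [f"  CONTEXT TURN {t}: {x}" for t, x in turns]
--     else:
--         lines = [f"  CONTEXT TURN {t}: {x}" for t, x in turns[:split]]
--         lines.append("--- TARGET TURNS (emit entries for these) ---")
--         lines += [f"  TARGET TURN {t}: {x}" for t, x in turns[split:]]
--     return "\n".join(lines)
-- ===== Notes on version B (the rewrite author's own statement) =====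
-- stated objective: simpler
-- what changed: Replaced the sticky in_target flag mutated inside one loop (plus a front list.insert) with a precomputed split index and two plain slice passes emitting CONTEXT then TARGET lines.
import Mathlib
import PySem

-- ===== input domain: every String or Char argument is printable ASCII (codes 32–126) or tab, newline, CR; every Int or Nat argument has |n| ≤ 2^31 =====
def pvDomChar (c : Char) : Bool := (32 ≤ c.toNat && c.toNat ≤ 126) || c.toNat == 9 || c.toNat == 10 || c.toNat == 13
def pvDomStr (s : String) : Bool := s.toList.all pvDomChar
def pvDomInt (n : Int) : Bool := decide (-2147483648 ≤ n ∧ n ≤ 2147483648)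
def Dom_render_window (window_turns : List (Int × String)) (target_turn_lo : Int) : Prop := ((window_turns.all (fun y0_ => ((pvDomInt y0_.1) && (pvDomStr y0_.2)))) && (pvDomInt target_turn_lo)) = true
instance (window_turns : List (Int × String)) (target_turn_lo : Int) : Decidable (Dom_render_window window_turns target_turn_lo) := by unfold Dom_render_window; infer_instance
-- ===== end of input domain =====

-- B replaces A's sticky in_target flag (and the front list.insert) by a precomputed
-- first-crossing split and two slice passes; objective: simpler, same O(n) cost.

-- ===== PORT A =====
-- A's loop: state (lines, in_target), in Python order.
def renderLoopA (target_turn_lo : Int) : List (Int × String) → List String → Bool → (List String × Bool)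
  | [], lines, in_target => (lines, in_target)
  | (tidx, text) :: rest, lines, in_target =>
      let st := if !in_target && decide (tidx ≥ target_turn_lo)
                then (lines ++ ["--- TARGET TURNS (emit entries for these) ---"], true)
                else (lines, in_target)
      let pre := if st.2 then "  TARGET" else "  CONTEXT"
      renderLoopA target_turn_lo rest (st.1 ++ [pre ++ " TURN " ++ PySem.Int.toStr tidx ++ ": " ++ text]) st.2

def render_window (window_turns : List (Int × String)) (target_turn_lo : Int) : String :=
  let st := renderLoopA target_turn_lo window_turns [] false
  let lines := if !st.2 then "--- TARGET TURNS ---" :: st.1 else st.1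
  PySem.Str.join "\n" lines

-- ===== PORT B =====
def ctxLine (p : Int × String) : String := "  CONTEXT TURN " ++ PySem.Int.toStr p.1 ++ ": " ++ p.2
def tgtLine (p : Int × String) : String := "  TARGET TURN " ++ PySem.Int.toStr p.1 ++ ": " ++ p.2

def render_window_alt (window_turns : List (Int × String)) (target_turn_lo : Int) : String :=
  -- split = first index with tidx ≥ target_turn_lo: turns[:split] / turns[split:]
  let preT := window_turns.takeWhile (fun p => decide (p.1 < target_turn_lo))
  let postT := window_turns.dropWhile (fun p => decide (p.1 < target_turn_lo))
  let lines :=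
    if postT.isEmpty then
      "--- TARGET TURNS ---" :: window_turns.map ctxLine
    else
      preT.map ctxLine ++ ("--- TARGET TURNS (emit entries for these) ---" :: postT.map tgtLine)
  PySem.Str.join "\n" lines

-- ===== PRECONDITION & SPEC =====
def Spec_render_window (window_turns : List (Int × String)) (target_turn_lo : Int) (out : String) : Prop := out = render_window_alt window_turns target_turn_lo
instance (window_turns : List (Int × String)) (target_turn_lo : Int) (out : String) : Decidable (Spec_render_window window_turns target_turn_lo out) := by unfold Spec_render_window; infer_instance

-- ===== CLAIM (what is proved, stated in full; the proofs are below) =====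
def Claim_equal_render_window : Prop := ∀ (window_turns : List (Int × String)) (target_turn_lo : Int), Dom_render_window window_turns target_turn_lo → Spec_render_window window_turns target_turn_lo (render_window window_turns target_turn_lo)

-- ===== LEMMAS AND PROOFS =====
theorem renderLoopA_true (lo : Int) (l : List (Int × String)) (acc : List String) :
    renderLoopA lo l acc true = (acc ++ l.map tgtLine, true) := by
  induction l generalizing acc with
  | nil => simp [renderLoopA]
  | cons p rest ih =>
      obtain ⟨t, x⟩ := p
      simp [renderLoopA, ih, tgtLine, String.append_assoc]

theorem renderLoopA_false (lo : Int) (l : List (Int × String)) (acc : List String) :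
    renderLoopA lo l acc false =
      if (l.dropWhile (fun p => decide (p.1 < lo))).isEmpty then
        (acc ++ l.map ctxLine, false)
      else
        (acc ++ (l.takeWhile (fun p => decide (p.1 < lo))).map ctxLine
             ++ "--- TARGET TURNS (emit entries for these) ---"
                :: (l.dropWhile (fun p => decide (p.1 < lo))).map tgtLine, true) := by
  induction l generalizing acc with
  | nil => simp [renderLoopA]
  | cons p rest ih =>
      obtain ⟨t, x⟩ := p
      by_cases h : t < lo
      · have hge : ¬ t ≥ lo := by omega
        have hd : List.dropWhile (fun p => decide (p.1 < lo)) ((t, x) :: rest)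
            = List.dropWhile (fun p => decide (p.1 < lo)) rest := by simp [h]
        have ht : List.takeWhile (fun p => decide (p.1 < lo)) ((t, x) :: rest)
            = (t, x) :: List.takeWhile (fun p => decide (p.1 < lo)) rest := by simp [h]
        simp only [renderLoopA, hge, ih, hd, ht, ctxLine]
        split_ifs <;> simp_all [String.append_assoc, ctxLine]
      · have hge : t ≥ lo := by omega
        simp [renderLoopA, hge, h, List.dropWhile_cons_of_neg, List.takeWhile_cons_of_neg,
          renderLoopA_true, tgtLine, String.append_assoc]

-- ===== VERDICT (by name: the statement is the Claim_ definition above) =====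
theorem render_window_spec : Claim_equal_render_window := by
  intro w lo _
  unfold Spec_render_window render_window render_window_alt
  rw [renderLoopA_false]
  by_cases h : (w.dropWhile (fun p => decide (p.1 < lo))).isEmpty
  · have hall : w.takeWhile (fun p => decide (p.1 < lo)) = w := by
      rw [List.isEmpty_iff] at h
      have := List.takeWhile_append_dropWhile (p := fun p => decide (p.1 < lo)) (l := w)
      simpa [h] using this
    simp [h]
  · simp [h]
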